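-- pv_equiv track=rewrite | github.com/Shafriii/PoC-EasyHoliday | src/booker_agent.py | _split_nights_across_cities
-- ===== SOURCE A (Python) =====
-- from typing import Optional, Dict, Any, List
--
-- def _split_nights_across_cities(cities: List[str], total_days: int) -> Dict[str, int]:
--     """
--     Evenly assign nights to each city, distributing any remainder to earlier cities.
--     """
--     if not cities:
--         return {}
--     base = total_days // len(cities)
--     remainder = total_days % len(cities)
--     nights = {}
--     for idx, city in enumerate(cities):
--         nights[city] = base + (1 if idx < remainder else 0)
--     return nights
-- ===== SOURCE B (Python) =====
-- from typing import Dict, List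
--
-- def _split_nights_across_cities(cities: List[str], total_days: int) -> Dict[str, int]:
--     """Greedy sequential split: each city takes the ceiling of the average of the
--     nights still remaining, which is then subtracted before moving on. No base,
--     no remainder, no branch; the empty dict falls out of the empty loop."""
--     nights = {}
--     remaining = total_days
--     left = len(cities)
--     for city in cities:
--         share = -((-remaining) // left)
--         nights[city] = share
--         remaining -= share
--         left -= 1
--     return nights
-- ===== Notes on version B (the rewrite author's own statement) =====
-- stated objective: alternative
-- what changed: Replaces the precomputed base/remainder with an idx<remainder branch by a greedy stateful loop: each city takes the ceiling of the remaining total over the cities left, and that share is subtracted from the running remainder; no mod, no enumerate, no branch, no empty guard.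
import Mathlib
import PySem

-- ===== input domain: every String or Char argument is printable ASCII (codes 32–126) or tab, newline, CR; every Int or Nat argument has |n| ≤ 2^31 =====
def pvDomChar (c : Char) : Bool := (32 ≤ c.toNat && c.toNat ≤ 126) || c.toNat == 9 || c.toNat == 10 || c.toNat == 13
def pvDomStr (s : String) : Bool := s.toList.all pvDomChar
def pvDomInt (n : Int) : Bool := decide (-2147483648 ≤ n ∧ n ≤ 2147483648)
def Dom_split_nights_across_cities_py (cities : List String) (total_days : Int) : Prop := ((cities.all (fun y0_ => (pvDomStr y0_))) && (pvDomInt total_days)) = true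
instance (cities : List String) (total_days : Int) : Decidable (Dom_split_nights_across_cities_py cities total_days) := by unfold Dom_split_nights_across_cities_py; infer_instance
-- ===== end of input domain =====

-- B replaces A's precomputed base/remainder and per-index branch by a greedy stateful loop:
-- each city takes the ceiling of the remaining total over the cities left, then that share is
-- subtracted (objective: alternative; same cost).

-- ===== PORT A =====
def split_nights_across_cities_py (cities : List String) (total_days : Int) : List (String × Int) :=
  if cities = [] then []
  else
    let base := PySem.Int.floordiv total_days (cities.length : Int)
    let remainder := PySem.Int.mod total_days (cities.length : Int)
    let nights : PySem.Dict String Int := PySem.Dict.empty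
    ((PySem.List.enumerate cities 0).foldl
      (fun (d : PySem.Dict String Int) p =>
        d.insert p.2 (base + (if p.1 < remainder then 1 else 0))) nights).items

-- ===== PORT B =====
-- state = (nights dict, remaining days, cities left)
def split_nights_across_cities_py_alt (cities : List String) (total_days : Int) : List (String × Int) :=
  ((cities.foldl
      (fun (s : PySem.Dict String Int × Int × Int) city =>
        let share := -(PySem.Int.floordiv (-s.2.1) s.2.2)
        (s.1.insert city share, s.2.1 - share, s.2.2 - 1))
      (PySem.Dict.empty, total_days, (cities.length : Int))).1).items

-- ===== PRECONDITION & SPEC =====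
def Spec_split_nights_across_cities_py (cities : List String) (total_days : Int) (out : List (String × Int)) : Prop := out = split_nights_across_cities_py_alt cities total_days
instance (cities : List String) (total_days : Int) (out : List (String × Int)) : Decidable (Spec_split_nights_across_cities_py cities total_days out) := by unfold Spec_split_nights_across_cities_py; infer_instance

-- ===== CLAIM (what is proved, stated in full; the proofs are below) =====
def Claim_equal_split_nights_across_cities_py : Prop := ∀ (cities : List String) (total_days : Int), Dom_split_nights_across_cities_py cities total_days → Spec_split_nights_across_cities_py cities total_days (split_nights_across_cities_py cities total_days)

-- ===== LEMMAS AND PROOFS =====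

-- One greedy step: for 0 < L, 0 ≤ r' ≤ L, ceil((base*L + r')/L) = base + (1 if r' > 0 else 0).
lemma pv_share (base r' L : Int) (hL : 0 < L) (h0 : 0 ≤ r') (hr : r' ≤ L) :
    -(PySem.Int.floordiv (-(base * L + r')) L) = base + (if 0 < r' then 1 else 0) := by
  rw [PySem.Int.neg_floordiv_neg_eq_iff_of_pos hL]
  split_ifs with h
  · constructor <;> nlinarith
  · constructor <;> nlinarith

-- Loop invariant: B's fold from (d, base*len(l) + max(rem-i,0), len(l)) over the suffix l
-- builds the same dict as A's fold over enumerate l i with values base + (1 if idx < rem else 0).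
lemma pv_fold (base rem : Int) :
    ∀ (l : List String) (i : Int) (d : PySem.Dict String Int), rem ≤ i + l.length →
      (l.foldl
        (fun (s : PySem.Dict String Int × Int × Int) city =>
          let share := -(PySem.Int.floordiv (-s.2.1) s.2.2)
          (s.1.insert city share, s.2.1 - share, s.2.2 - 1))
        (d, base * (l.length : Int) + max (rem - i) 0, (l.length : Int))).1
      = (PySem.List.enumerate l i).foldl
          (fun (d : PySem.Dict String Int) p =>
            d.insert p.2 (base + (if p.1 < rem then 1 else 0))) d := by
  intro l
  induction l with
  | nil => intro i d _; simp [PySem.List.enumerate_nil]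
  | cons c l ih =>
    intro i d hle
    rw [PySem.List.enumerate_cons]
    simp only [List.foldl_cons, List.length_cons]
    have hL : (0 : Int) < (l.length : Int) + 1 := by positivity
    have hcast : ((l.length + 1 : Nat) : Int) = (l.length : Int) + 1 := by push_cast; ring
    have hshare :
        -(PySem.Int.floordiv (-(base * ((l.length + 1 : Nat) : Int) + max (rem - i) 0)) ((l.length + 1 : Nat) : Int))
          = base + (if i < rem then 1 else 0) := by
      rw [hcast]
      have := pv_share base (max (rem - i) 0) ((l.length : Int) + 1) hL (le_max_right _ _)
        (by simp only [List.length_cons] at hle; push_cast at hle; omega)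
      rw [this]
      congr 1
      split_ifs with h1 h2 h3 <;> omega
    simp only [hshare]
    have hrem' : base * ((l.length + 1 : Nat) : Int) + max (rem - i) 0 - (base + (if i < rem then 1 else 0))
        = base * (l.length : Int) + max (rem - (i + 1)) 0 := by
      rw [hcast]
      by_cases h : i < rem
      · rw [if_pos h, max_eq_left (by omega : (0:Int) ≤ rem - i), max_eq_left (by omega : (0:Int) ≤ rem - (i+1))]
        ring
      · rw [if_neg h, max_eq_right (by omega : rem - i ≤ (0:Int)), max_eq_right (by omega : rem - (i+1) ≤ (0:Int))]
        ring
    have hlen : ((l.length + 1 : Nat) : Int) - 1 = (l.length : Int) := by rw [hcast]; ring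
    rw [hrem', hlen]
    exact ih (i + 1) (d.insert c (base + (if i < rem then 1 else 0))) (by simp only [List.length_cons] at hle; push_cast at hle ⊢; omega)

-- ===== VERDICT (by name: the statement is the Claim_ definition above) =====
theorem split_nights_across_cities_py_spec : Claim_equal_split_nights_across_cities_py := by
  intro cities t _
  unfold Spec_split_nights_across_cities_py
  unfold split_nights_across_cities_py split_nights_across_cities_py_alt
  by_cases h : cities = []
  · simp [h, PySem.Dict.empty]
  · have hn : 0 < (cities.length : Int) := by exact_mod_cast List.length_pos_iff.mpr h
    simp only [if_neg h]
    set base := PySem.Int.floordiv t (cities.length : Int) with hb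
    set rem := PySem.Int.mod t (cities.length : Int) with hr
    have hrm : rem = t % (cities.length : Int) := PySem.Int.mod_eq_emod_of_pos hn
    have hrem0 : 0 ≤ rem := by rw [hrm]; exact Int.emod_nonneg t (ne_of_gt hn)
    have hremn : rem < (cities.length : Int) := by rw [hrm]; exact Int.emod_lt_of_pos t hn
    have ht : t = base * (cities.length : Int) + max (rem - 0) 0 := by
      have h2 := PySem.Int.floordiv_mul_add_mod t (cities.length : Int)
      rw [← hb, ← hr] at h2
      rw [max_eq_left (by omega)]
      omega
    congr 1
    rw [ht]
    exact (pv_fold base rem cities 0 PySem.Dict.empty (by omega)).symm ▸ rfl
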